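-- pv_equiv track=rewrite | github.com/YashB63/GFG-Daily-Questions | Day 521/Nodes at even distance/nodes_at_even_distance.py | countOfNodes
-- ===== SOURCE A (Python) =====
-- def countOfNodes(graph,n):
--     dis=[0]*(n+1)
--     vis=[True]*(n+1)
--
--     def dfs(node,c):
--         vis[node]=False
--         dis[node]=c
--
--         for i in graph[node]:
--             if vis[i]:
--                 dfs(i,c+1)
--
--     dfs(1,0)
--
--     even=odd=0
--
--     for i in range(1,n+1):
--         if dis[i]%2:
--             odd+=1
--
--         else:
--             even+=1
--
--     return (even*(even-1)//2+(odd)*(odd-1)//2)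
-- ===== SOURCE B (Python) =====
-- def countOfNodes(graph, n):
--     # Iterative DFS with an explicit stack of (node, remaining-neighbours)
--     # frames, recording each node's discovery depth in a dict; the pair count
--     # needs only the number of even-depth nodes among 1..n (odd = n - even).
--     depth = {1: 0}
--     stack = [(1, graph[1])]
--     while stack:
--         u, rem = stack.pop()
--         if rem:
--             v, rem = rem[0], rem[1:]
--             stack.append((u, rem))
--             if v not in depth:
--                 depth[v] = depth[u] + 1
--                 stack.append((v, graph[v]))
--     even = sum(1 for i in range(1, n + 1) if depth.get(i, 0) % 2 == 0)
--     odd = n - even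
--     return even * (even - 1) // 2 + odd * (odd - 1) // 2
-- ===== Notes on version B (the rewrite author's own statement) =====
-- stated objective: alternative
-- what changed: Replaces the recursive DFS writing into dis/vis arrays with an iterative explicit-stack DFS over (node, remaining-neighbours) frames that records discovery depths in a dict keyed by node id, then counts even depths over 1..n (odd = n - even); Pre_ restricts inputs to the task's natural domain (distinct keys, every node reachable from 1 being an id in 0..n with its own adjacency entry), excluding inputs where A raises KeyError/IndexError and graphs with out-of-band node ids, on which A's array writes alias slots via Python's negative indexing.
-- outside the precondition, e.g. on countOfNodes({1: [-1], -1: []}, 2): A returns 0, B returns 1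
import Mathlib
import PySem

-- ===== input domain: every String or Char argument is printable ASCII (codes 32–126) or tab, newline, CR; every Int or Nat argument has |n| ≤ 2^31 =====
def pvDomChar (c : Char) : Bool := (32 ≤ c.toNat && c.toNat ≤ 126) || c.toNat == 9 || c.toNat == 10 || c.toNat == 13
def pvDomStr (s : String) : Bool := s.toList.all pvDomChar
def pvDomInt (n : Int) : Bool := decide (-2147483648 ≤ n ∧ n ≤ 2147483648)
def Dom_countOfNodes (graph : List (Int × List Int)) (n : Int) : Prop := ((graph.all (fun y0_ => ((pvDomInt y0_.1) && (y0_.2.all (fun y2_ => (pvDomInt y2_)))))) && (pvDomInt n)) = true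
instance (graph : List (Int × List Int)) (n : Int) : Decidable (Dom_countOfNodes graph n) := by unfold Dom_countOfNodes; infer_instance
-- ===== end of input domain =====

-- B replaces A's recursive DFS over dis/vis arrays by an iterative explicit-stack DFS
-- recording discovery depths in a dict keyed by node id (alternative, not faster).

-- ===== PORT A =====

-- graph[k] : dict lookup; `.getD []` is only reached on a KeyError input, which Pre_ excludes
def pyLookup (graph : List (Int × List Int)) (k : Int) : List Int :=
  ((PySem.Dict.mk graph).get? k).getD []

-- l[i] for lists (default only reached outside Pre_: Python raises IndexError there)
def lgetB (l : List Bool) (i : Int) : Bool := (PySem.List.pyGet? l i).getD false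
def lgetI (l : List Int) (i : Int) : Int := (PySem.List.pyGet? l i).getD 0

-- l[i] = x ; Python list assignment (negative indices wrap); where Python raises
-- IndexError (pyIdx? = none) the list is returned unchanged — excluded by Pre_
def lset {α : Type} (l : List α) (i : Int) (x : α) : List α :=
  match PySem.List.pyIdx? l.length i with
  | some k => l.set k x
  | none => l

-- the nested `def dfs(node, c)` of A; fuel bounds only the recursion DEPTH (a guard
-- making the recursion total; proven never to run out under Pre_)
mutual
def dfsA (graph : List (Int × List Int)) : Nat → Int → Int → List Int → List Bool → Option (List Int × List Bool)
  | 0, _, _, _, _ => none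
  | fa+1, node, c, dis, vis =>
      dfsLoop graph fa (pyLookup graph node) c (lset dis node c) (lset vis node false)
termination_by fa _ _ _ _ => (fa, 0)

-- `for i in graph[node]: if vis[i]: dfs(i, c+1)`
def dfsLoop (graph : List (Int × List Int)) : Nat → List Int → Int → List Int → List Bool → Option (List Int × List Bool)
  | _, [], _, dis, vis => some (dis, vis)
  | fa, i :: rest, c, dis, vis =>
      if lgetB vis i then
        match dfsA graph fa i (c+1) dis vis with
        | none => none
        | some (d, v) => dfsLoop graph fa rest c d v
      else dfsLoop graph fa rest c dis vis
termination_by fa l _ _ _ => (fa, l.length + 1)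
end

def countOfNodes (graph : List (Int × List Int)) (n : Int) : Int :=
  let dis := List.replicate (n+1).toNat (0 : Int)
  let vis := List.replicate (n+1).toNat true
  match dfsA graph ((n+1).toNat + 1) 1 0 dis vis with
  | none => 0   -- fuel exhaustion: unreachable under Pre_ (proved below)
  | some r =>
      let p := (PySem.List.pyRange 1 (n+1) 1).foldl
        (fun (p : Int × Int) i =>
          if PySem.Int.mod (lgetI r.1 i) 2 ≠ 0 then (p.1, p.2 + 1) else (p.1 + 1, p.2))
        (0, 0)
      PySem.Int.floordiv (p.1 * (p.1 - 1)) 2 + PySem.Int.floordiv (p.2 * (p.2 - 1)) 2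

-- ===== PORT B =====

-- termination measure ingredients for the while loop (not part of the algorithm's data)
def bUniv (graph : List (Int × List Int)) : List Int :=
  ((graph.map Prod.fst) ++ (graph.flatMap Prod.snd)).dedup
def wNode (graph : List (Int × List Int)) (v : Int) : Nat :=
  2 * (pyLookup graph v).length + 2
def uCount (graph : List (Int × List Int)) (depth : PySem.Dict Int Int) : Nat :=
  (((bUniv graph).filter (fun v => !(depth.contains v))).map (wNode graph)).sum
def sCount (stack : List (Int × List Int)) : Nat :=
  (stack.map (fun f => 2 * f.2.length + 1)).sum

-- sum over a filtered Nodup list: flipping one element out removes exactly its weight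
lemma sum_filter_flip {l : List Int} (w : Int → Nat) (v : Int) (hnd : l.Nodup) (hv : v ∈ l)
    (p q : Int → Bool) (hpv : p v = true) (hqv : q v = false)
    (hagree : ∀ x ∈ l, x ≠ v → q x = p x) :
    ((l.filter q).map w).sum + w v = ((l.filter p).map w).sum := by
  induction l with
  | nil => cases hv
  | cons a t ih =>
    rcases List.nodup_cons.mp hnd with ⟨ha, hndt⟩
    rcases List.mem_cons.mp hv with rfl | hvt
    · have : t.filter q = t.filter p := by
        apply List.filter_congr
        intro x hx
        exact hagree x (List.mem_cons_of_mem _ hx) (fun h => ha (h ▸ hx))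
      simp [hpv, hqv, this]
      omega
    · have hav : a ≠ v := fun h => ha (h ▸ hvt)
      have hq : q a = p a := hagree a (List.mem_cons_self) hav
      by_cases hp : p a = true
      · simp [hp, hq ▸ hp]
        have := ih hndt hvt (fun x hx hxv => hagree x (List.mem_cons_of_mem _ hx) hxv)
        omega
      · simp only [Bool.not_eq_true] at hp
        simp [hp, hq]
        exact ih hndt hvt (fun x hx hxv => hagree x (List.mem_cons_of_mem _ hx) hxv)

lemma sum_filter_le {l : List Int} (w : Int → Nat) (p q : Int → Bool)
    (h : ∀ x ∈ l, q x = true → p x = true) :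
    ((l.filter q).map w).sum ≤ ((l.filter p).map w).sum := by
  induction l with
  | nil => simp
  | cons a t ih =>
      have iht := ih (fun x hx => h x (List.mem_cons_of_mem _ hx))
      by_cases hqa : q a = true
      · have hpa := h a (List.mem_cons_self) hqa
        simp [hqa, hpa]; omega
      · simp only [Bool.not_eq_true] at hqa
        by_cases hpa : p a = true
        · simp [hqa, hpa]; omega
        · simp only [Bool.not_eq_true] at hpa
          simp [hqa, hpa]; exact iht

lemma uCount_insert_of_mem (graph : List (Int × List Int))
    (depth : PySem.Dict Int Int) (v : Int) (x : Int)
    (hv : v ∈ bUniv graph) (hc : depth.contains v = false) :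
    uCount graph (depth.insert v x) + wNode graph v = uCount graph depth := by
  unfold uCount
  exact sum_filter_flip (wNode graph) v (List.nodup_dedup _) hv _ _
    (by simp [hc]) (by simp [PySem.Dict.contains_insert_self])
    (fun w _ hwv => by simp [PySem.Dict.contains_insert, hwv])

lemma uCount_insert_le (graph : List (Int × List Int))
    (depth : PySem.Dict Int Int) (v : Int) (x : Int) :
    uCount graph (depth.insert v x) ≤ uCount graph depth := by
  unfold uCount
  apply sum_filter_le
  intro w _ hw
  simp only [Bool.not_eq_true', PySem.Dict.contains_insert, Bool.or_eq_false_iff] at hw ⊢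
  exact hw.2

lemma pyLookup_of_not_mem (graph : List (Int × List Int)) (v : Int) (hv : v ∉ bUniv graph) :
    pyLookup graph v = [] := by
  have hk : v ∉ (PySem.Dict.mk graph).keys := by
    intro h
    exact hv (List.mem_dedup.mpr (List.mem_append.mpr (Or.inl h)))
  unfold pyLookup
  rw [(PySem.Dict.get?_eq_none_iff_not_mem_keys (PySem.Dict.mk graph) v).mpr hk]
  rfl

-- the `while stack:` loop of B
def execB (graph : List (Int × List Int)) :
    List (Int × List Int) → PySem.Dict Int Int → PySem.Dict Int Int
  | [], depth => depth
  | (u, rem) :: rest, depth =>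
      match rem with
      | [] => execB graph rest depth
      | v :: rem' =>
          if depth.contains v then
            execB graph ((u, rem') :: rest) depth
          else
            execB graph ((v, pyLookup graph v) :: (u, rem') :: rest)
              (depth.insert v (depth.getD u 0 + 1))
termination_by stack depth => uCount graph depth + sCount stack
decreasing_by
  · simp [sCount]
  · simp [sCount]
  · rename_i h
    simp only [Bool.not_eq_true] at h
    by_cases hv : v ∈ bUniv graph
    · have h1 := uCount_insert_of_mem graph depth v (depth.getD u 0 + 1) hv h
      simp [sCount, wNode] at h1 ⊢
      omega
    · have h1 := uCount_insert_le graph depth v (depth.getD u 0 + 1)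
      have h2 := pyLookup_of_not_mem graph v hv
      simp [sCount, h2]
      omega

def countOfNodes_alt (graph : List (Int × List Int)) (n : Int) : Int :=
  let depth := execB graph [(1, pyLookup graph 1)] (PySem.Dict.empty.insert 1 0)
  let even := (PySem.List.pyRange 1 (n+1) 1).foldl
    (fun acc i => if PySem.Int.mod (depth.getD i 0) 2 = 0 then acc + 1 else acc) (0 : Int)
  let odd := n - even
  PySem.Int.floordiv (even * (even - 1)) 2 + PySem.Int.floordiv (odd * (odd - 1)) 2

-- ===== PRECONDITION & SPEC =====
-- helpers for Pre_ only (independent of both ports): the set of nodes reachable from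
-- node 1, computed as the closure of {1} under the dict's neighbour lists
def preLookup (graph : List (Int × List Int)) (k : Int) : List Int :=
  ((PySem.Dict.mk graph).get? k).getD []
def preUniv (graph : List (Int × List Int)) : List Int :=
  ((graph.map Prod.fst) ++ (graph.flatMap Prod.snd)).dedup
def stepR (graph : List (Int × List Int)) (S : List Int) : List Int :=
  PySem.Set.update S (S.flatMap (fun u => preLookup graph u))
def reachSet (graph : List (Int × List Int)) : List Int :=
  (stepR graph)^[(preUniv graph).length + 1] [1]

-- Pre_ restricts inputs to the task's natural domain — n ≥ 1, an entry for node 1,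
-- distinct keys, and every node reachable from node 1 being an id in 0..n with its own
-- adjacency entry: it excludes exactly the inputs on which A raises (KeyError /
-- IndexError), duplicate-key association lists (impossible for a Python dict), and
-- graphs with reachable node ids outside 0..n, on which A's array writes land in
-- slots of other nodes via Python's negative indexing.
def Pre_countOfNodes (graph : List (Int × List Int)) (n : Int) : Prop :=
  1 ≤ n ∧ (PySem.Dict.mk graph).contains 1 = true ∧ (graph.map Prod.fst).Nodup ∧
  ∀ v ∈ reachSet graph, 0 ≤ v ∧ v ≤ n ∧ (PySem.Dict.mk graph).contains v = true
instance (graph : List (Int × List Int)) (n : Int) : Decidable (Pre_countOfNodes graph n) := by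
  unfold Pre_countOfNodes; infer_instance

def pvWitness_countOfNodes : (List (Int × List Int)) × Int := ([(1, [2]), (2, [1]), (3, [])], 3)

def Spec_countOfNodes (graph : List (Int × List Int)) (n : Int) (out : Int) : Prop := out = countOfNodes_alt graph n
instance (graph : List (Int × List Int)) (n : Int) (out : Int) : Decidable (Spec_countOfNodes graph n out) := by unfold Spec_countOfNodes; infer_instance

-- ===== CLAIM (what is proved, stated in full; the proofs are below) =====
def Claim_equal_countOfNodes : Prop := ∀ (graph : List (Int × List Int)) (n : Int), Dom_countOfNodes graph n → Pre_countOfNodes graph n → Spec_countOfNodes graph n (countOfNodes graph n)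

-- ===== LEMMAS AND PROOFS =====

lemma preLookup_eq (graph : List (Int × List Int)) (k : Int) :
    preLookup graph k = pyLookup graph k := rfl

lemma mem_flatMap_of_lookup {graph : List (Int × List Int)} {u v : Int}
    (hv : v ∈ pyLookup graph u) : v ∈ graph.flatMap Prod.snd := by
  unfold pyLookup at hv
  cases hget : (PySem.Dict.mk graph).get? u with
  | none => rw [hget] at hv; simp at hv
  | some l =>
      rw [hget] at hv
      exact List.mem_flatMap.mpr ⟨(u, l), PySem.Dict.mem_items_of_get?_eq_some _ hget, hv⟩

lemma stepR_eq_append (graph : List (Int × List Int)) (S : List Int) :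
    stepR graph S = S ++ ((PySem.Set.ofList (S.flatMap (fun u => preLookup graph u))).filter
      (fun y => !(PySem.Set.contains S y))) :=
  PySem.Set.update_eq_append_filter S _

lemma subset_stepR (graph : List (Int × List Int)) (S : List Int) : S ⊆ stepR graph S := by
  rw [stepR_eq_append]; exact List.subset_append_left _ _

lemma nodup_stepR (graph : List (Int × List Int)) (S : List Int) (h : S.Nodup) :
    (stepR graph S).Nodup := PySem.Set.nodup_update S _ h

lemma stepR_sub (graph : List (Int × List Int)) (S : List Int)
    (hS : S ⊆ 1 :: preUniv graph) : stepR graph S ⊆ 1 :: preUniv graph := by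
  intro x hx
  rcases (PySem.Set.mem_update S _ x).mp hx with h | h
  · exact hS h
  · rcases List.mem_flatMap.mp h with ⟨u, _, hxl⟩
    rw [preLookup_eq] at hxl
    exact List.mem_cons_of_mem _ (List.mem_dedup.mpr
      (List.mem_append.mpr (Or.inr (mem_flatMap_of_lookup hxl))))

lemma closed_of_stepR_fix {graph : List (Int × List Int)} {S : List Int}
    (hfix : stepR graph S = S) {u v : Int} (hu : u ∈ S) (hv : v ∈ pyLookup graph u) :
    v ∈ S := by
  rw [← hfix]
  exact (PySem.Set.mem_update S _ v).mpr
    (Or.inr (List.mem_flatMap.mpr ⟨u, hu, by rw [preLookup_eq]; exact hv⟩))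

lemma iterate_fix (graph : List (Int × List Int)) (S : List Int)
    (h : stepR graph S = S) : ∀ k, (stepR graph)^[k] S = S := by
  intro k
  induction k with
  | zero => rfl
  | succ k ih => rw [Function.iterate_succ_apply, h, ih]

lemma nodup_length_le {S l : List Int} (h : S.Nodup) (hsub : S ⊆ l) :
    S.length ≤ l.length := by
  classical
  calc S.length = S.toFinset.card := (List.toFinset_card_of_nodup h).symm
  _ ≤ l.toFinset.card := Finset.card_le_card (by intro x hx; simp at hx ⊢; exact hsub hx)
  _ ≤ l.length := l.toFinset_card_le

lemma main_fix (graph : List (Int × List Int)) :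
    ∀ (m : Nat) (S : List Int), S.Nodup → S ⊆ 1 :: preUniv graph →
      (preUniv graph).length + 1 ≤ S.length + m →
      stepR graph ((stepR graph)^[m] S) = (stepR graph)^[m] S := by
  intro m
  induction m with
  | zero =>
      intro S hnd hsub hlen
      simp only [Function.iterate_zero, id]
      rw [stepR_eq_append]
      have h1 : (stepR graph S).length ≤ (1 :: preUniv graph).length :=
        nodup_length_le (nodup_stepR graph S hnd) (stepR_sub graph S hsub)
      rw [stepR_eq_append] at h1
      simp only [List.length_append, List.length_cons] at h1
      have : ((PySem.Set.ofList (S.flatMap (fun u => preLookup graph u))).filter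
          (fun y => !(PySem.Set.contains S y))).length = 0 := by omega
      rw [List.length_eq_zero_iff] at this
      rw [this, List.append_nil]
  | succ m ih =>
      intro S hnd hsub hlen
      by_cases hf : stepR graph S = S
      · rw [iterate_fix graph S hf (m+1), hf]
      · have hpre := stepR_eq_append graph S
        have hne : ((PySem.Set.ofList (S.flatMap (fun u => preLookup graph u))).filter
            (fun y => !(PySem.Set.contains S y))).length ≠ 0 := by
          intro h0
          rw [List.length_eq_zero_iff] at h0
          rw [h0, List.append_nil] at hpre
          exact hf hpre
        have hlen' : S.length + 1 ≤ (stepR graph S).length := by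
          rw [hpre]; simp only [List.length_append]; omega
        have := ih (stepR graph S) (nodup_stepR graph S hnd) (stepR_sub graph S hsub)
          (by omega)
        rw [← Function.iterate_succ_apply] at this
        exact this

lemma reach_fix (graph : List (Int × List Int)) :
    stepR graph (reachSet graph) = reachSet graph := by
  apply main_fix graph ((preUniv graph).length + 1) [1] (by simp)
  · intro x hx; simp at hx; subst hx; exact List.mem_cons_self
  · simp

lemma one_mem_reach (graph : List (Int × List Int)) : 1 ∈ reachSet graph := by
  unfold reachSet
  generalize (preUniv graph).length + 1 = k
  induction k with
  | zero => simp
  | succ k ih => rw [Function.iterate_succ_apply']; exact subset_stepR graph _ ih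

lemma reach_closed {graph : List (Int × List Int)} {u v : Int}
    (hu : u ∈ reachSet graph) (hv : v ∈ pyLookup graph u) : v ∈ reachSet graph :=
  closed_of_stepR_fix (reach_fix graph) hu hv

-- bounds on every reachable node, extracted from Pre_
def GoodR (graph : List (Int × List Int)) (n : Int) : Prop :=
  ∀ v ∈ reachSet graph, 0 ≤ v ∧ v ≤ n

-- the simulation relation between A's (dis, vis) arrays and B's depth dict
def MatchS (n : Int) (dis : List Int) (vis : List Bool) (D : PySem.Dict Int Int) : Prop :=
  dis.length = (n+1).toNat ∧ vis.length = (n+1).toNat ∧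
  ∀ j : Int, 0 ≤ j → j ≤ n →
    lgetB vis j = !(D.contains j) ∧ lgetI dis j = D.getD j 0

-- raw accesses for a nonnegative in-range index
lemma pyIdx?_band (N : Nat) (n v : Int) (hN : (N : Int) = n + 1)
    (h1 : 0 ≤ v) (h2 : v ≤ n) :
    PySem.List.pyIdx? N v = some v.toNat := by
  unfold PySem.List.pyIdx?
  rw [if_pos h1, if_pos (by omega)]

lemma lgetB_slot (l : List Bool) (n v : Int) (hlen : l.length = (n+1).toNat) (hn : 1 ≤ n)
    (h1 : 0 ≤ v) (h2 : v ≤ n) : lgetB l v = (l[v.toNat]?).getD false := by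
  unfold lgetB PySem.List.pyGet?
  rw [hlen, pyIdx?_band _ n v (by omega) h1 h2]
  rfl

lemma lgetI_slot (l : List Int) (n v : Int) (hlen : l.length = (n+1).toNat) (hn : 1 ≤ n)
    (h1 : 0 ≤ v) (h2 : v ≤ n) : lgetI l v = (l[v.toNat]?).getD 0 := by
  unfold lgetI PySem.List.pyGet?
  rw [hlen, pyIdx?_band _ n v (by omega) h1 h2]
  rfl

lemma lset_slot {α : Type} (l : List α) (n v : Int) (x : α)
    (hlen : l.length = (n+1).toNat) (hn : 1 ≤ n) (h1 : 0 ≤ v) (h2 : v ≤ n) :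
    lset l v x = l.set v.toNat x := by
  unfold lset
  rw [hlen, pyIdx?_band _ n v (by omega) h1 h2]

lemma length_lset {α : Type} (l : List α) (i : Int) (x : α) : (lset l i x).length = l.length := by
  unfold lset
  cases PySem.List.pyIdx? l.length i <;> simp

lemma MatchS_mark {n : Int} {dis : List Int} {vis : List Bool} {D : PySem.Dict Int Int}
    (hM : MatchS n dis vis D) (u c : Int) (hn : 1 ≤ n) (hu1 : 0 ≤ u) (hu2 : u ≤ n) :
    MatchS n (lset dis u c) (lset vis u false) (D.insert u c) := by
  obtain ⟨hld, hlv, hj⟩ := hM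
  refine ⟨by rw [length_lset]; exact hld, by rw [length_lset]; exact hlv, ?_⟩
  intro j h1 h2
  have hidxv : u.toNat < vis.length := by omega
  have hidxd : u.toNat < dis.length := by omega
  by_cases hju : j = u
  · constructor
    · rw [lgetB_slot _ n j (by rw [length_lset]; exact hlv) hn h1 h2,
        lset_slot vis n u false hlv hn hu1 hu2]
      rw [hju, List.getElem?_set_self hidxv]
      simp [PySem.Dict.contains_insert_self]
    · rw [lgetI_slot _ n j (by rw [length_lset]; exact hld) hn h1 h2,
        lset_slot dis n u c hld hn hu1 hu2]
      rw [hju, List.getElem?_set_self hidxd]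
      simp [PySem.Dict.getD_insert_self]
  · have hne : j.toNat ≠ u.toNat := by omega
    constructor
    · rw [lgetB_slot _ n j (by rw [length_lset]; exact hlv) hn h1 h2,
        lset_slot vis n u false hlv hn hu1 hu2,
        List.getElem?_set_ne (by omega)]
      have hv' : vis[j.toNat]?.getD false = lgetB vis j := by
        rw [lgetB_slot vis n j hlv hn h1 h2]
      rw [hv', (hj j h1 h2).1, PySem.Dict.contains_insert]
      simp [hju]
    · rw [lgetI_slot _ n j (by rw [length_lset]; exact hld) hn h1 h2,
        lset_slot dis n u c hld hn hu1 hu2,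
        List.getElem?_set_ne (by omega)]
      have hd' : dis[j.toNat]?.getD 0 = lgetI dis j := by
        rw [lgetI_slot dis n j hld hn h1 h2]
      rw [hd', (hj j h1 h2).2, PySem.Dict.getD_insert]
      simp [hju]

-- single steps of B's while loop
lemma execB_nil (graph : List (Int × List Int)) (D : PySem.Dict Int Int) :
    execB graph [] D = D := by rw [execB.eq_def]

lemma execB_nilframe (graph : List (Int × List Int)) (u : Int)
    (rest : List (Int × List Int)) (D : PySem.Dict Int Int) :
    execB graph ((u, []) :: rest) D = execB graph rest D := by
  rw [execB.eq_def]

lemma execB_skip (graph : List (Int × List Int)) (u v : Int) (rem' : List Int)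
    (rest : List (Int × List Int)) (D : PySem.Dict Int Int)
    (h : D.contains v = true) :
    execB graph ((u, v :: rem') :: rest) D = execB graph ((u, rem') :: rest) D := by
  rw [execB.eq_def]; simp [h]

lemma execB_visit (graph : List (Int × List Int)) (u v : Int) (rem' : List Int)
    (rest : List (Int × List Int)) (D : PySem.Dict Int Int)
    (h : D.contains v = false) :
    execB graph ((u, v :: rem') :: rest) D =
      execB graph ((v, pyLookup graph v) :: (u, rem') :: rest)
        (D.insert v (D.getD u 0 + 1)) := by
  rw [execB.eq_def]; simp [h]

-- the simulation statement for dfsA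
def SimA (graph : List (Int × List Int)) (n : Int) (fa : Nat) : Prop :=
  ∀ u c dis vis r D, u ∈ reachSet graph → D.contains u = false →
    MatchS n dis vis D →
    dfsA graph fa u c dis vis = some r →
    ∃ D₁, MatchS n r.1 r.2 D₁ ∧ (∀ j, D.contains j = true → D₁.get? j = D.get? j) ∧
      ∀ rest, execB graph ((u, pyLookup graph u) :: rest) (D.insert u c) =
        execB graph rest D₁

lemma contains_of_get?_eq_some {D : PySem.Dict Int Int} {u c : Int}
    (h : D.get? u = some c) : D.contains u = true := by
  rw [PySem.Dict.contains_eq_isSome_get?, h]; rfl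

lemma simLoop {graph : List (Int × List Int)} {n : Int} (_hn : 1 ≤ n) (hg : GoodR graph n)
    (fa : Nat) (ihA : SimA graph n fa) :
    ∀ l c dis vis r D u, (∀ v ∈ l, v ∈ reachSet graph) → MatchS n dis vis D →
      D.get? u = some c →
      dfsLoop graph fa l c dis vis = some r →
      ∃ D₁, MatchS n r.1 r.2 D₁ ∧ (∀ j, D.contains j = true → D₁.get? j = D.get? j) ∧
        ∀ rest, execB graph ((u, l) :: rest) D = execB graph rest D₁ := by
  intro l
  induction l with
  | nil =>
      intro c dis vis r D u _ hM _ hrun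
      rw [dfsLoop] at hrun
      refine ⟨D, ?_, fun j _ => rfl, fun rest => execB_nilframe graph u rest D⟩
      cases hrun; exact hM
  | cons v rest' ih =>
      intro c dis vis r D u hval hM hDu hrun
      have hvr : v ∈ reachSet graph := hval v (List.mem_cons_self)
      obtain ⟨hv1, hv2⟩ := hg v hvr
      have hvisv : lgetB vis v = !(D.contains v) := (hM.2.2 v hv1 hv2).1
      rw [dfsLoop] at hrun
      by_cases hcv : D.contains v = true
      · rw [hvisv, hcv] at hrun
        simp only [Bool.not_true, Bool.false_eq_true, if_false] at hrun
        obtain ⟨D₁, hM₁, hp₁, he₁⟩ :=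
          ih c dis vis r D u (fun w hw => hval w (List.mem_cons_of_mem _ hw)) hM hDu hrun
        exact ⟨D₁, hM₁, hp₁, fun rest => by
          rw [execB_skip graph u v rest' rest D hcv, he₁ rest]⟩
      · have hcv' : D.contains v = false := by simp at hcv; exact hcv
        rw [hvisv, hcv'] at hrun
        simp only [Bool.not_false, if_true] at hrun
        cases h2 : dfsA graph fa v (c+1) dis vis with
        | none => rw [h2] at hrun; simp at hrun
        | some dv =>
            rw [h2] at hrun
            obtain ⟨D₂, hM₂, hp₂, he₂⟩ := ihA v (c+1) dis vis dv D hvr hcv' hM h2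
            have hcu : D.contains u = true := contains_of_get?_eq_some hDu
            have hDu₂ : D₂.get? u = some c := by rw [hp₂ _ hcu]; exact hDu
            obtain ⟨D₁, hM₁, hp₁, he₁⟩ :=
              ih c dv.1 dv.2 r D₂ u (fun w hw => hval w (List.mem_cons_of_mem _ hw)) hM₂
                hDu₂ hrun
            refine ⟨D₁, hM₁, ?_, ?_⟩
            · intro j hj
              have hj₂ : D₂.contains j = true := by
                rw [PySem.Dict.contains_eq_isSome_get?, hp₂ j hj,
                  ← PySem.Dict.contains_eq_isSome_get?]; exact hj
              rw [hp₁ j hj₂, hp₂ j hj]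
            · intro rest
              rw [execB_visit graph u v rest' rest D hcv',
                PySem.Dict.getD_eq_get?_getD, hDu]
              have := he₂ ((u, rest') :: rest)
              simp only [Option.getD_some] at this ⊢
              rw [this, he₁ rest]

lemma simA {graph : List (Int × List Int)} {n : Int} (hn : 1 ≤ n) (hg : GoodR graph n) :
    ∀ fa, SimA graph n fa := by
  intro fa
  induction fa with
  | zero => intro u c dis vis r D _ _ _ hA; simp [dfsA] at hA
  | succ fa ih =>
      intro u c dis vis r D hur hcu hM hA
      rw [dfsA] at hA
      obtain ⟨hu1, hu2⟩ := hg u hur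
      have hM' := MatchS_mark hM u c hn hu1 hu2
      obtain ⟨D₁, hM₁, hp₁, he₁⟩ :=
        simLoop hn hg fa ih (pyLookup graph u) c _ _ r (D.insert u c) u
          (fun v hv => reach_closed hur hv) hM'
          (PySem.Dict.get?_insert_self D u c) hA
      refine ⟨D₁, hM₁, ?_, he₁⟩
      intro j hj
      have hju : j ≠ u := fun h => by rw [h, hcu] at hj; cases hj
      rw [hp₁ j (by rw [PySem.Dict.contains_insert, hj]; simp),
        PySem.Dict.get?_insert_of_ne D c hju]

-- fuel sufficiency for A's recursion: recursion depth is bounded by the number of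
-- still-unvisited entries
def tCount (l : List Bool) : Nat := l.countP (fun b => b)

lemma countP_set_false_le (l : List Bool) (k : Nat) :
    (l.set k false).countP (fun b => b) ≤ l.countP (fun b => b) := by
  induction l generalizing k with
  | nil => simp
  | cons a t ih =>
      cases k with
      | zero => simp only [List.set_cons_zero, List.countP_cons]; cases a <;> simp
      | succ k => simp only [List.set_cons_succ, List.countP_cons]; have := ih k; omega

lemma countP_set_false_lt (l : List Bool) (k : Nat) (h : l[k]? = some true) :
    (l.set k false).countP (fun b => b) < l.countP (fun b => b) := by
  induction l generalizing k with
  | nil => simp at h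
  | cons a t ih =>
      cases k with
      | zero =>
          simp at h
          subst h
          simp
      | succ k =>
          simp only [List.getElem?_cons_succ] at h
          simp only [List.set_cons_succ, List.countP_cons]
          have := ih k h
          omega

lemma tCount_lset_le (vis : List Bool) (u : Int) : tCount (lset vis u false) ≤ tCount vis := by
  unfold lset tCount
  cases PySem.List.pyIdx? vis.length u with
  | none => exact le_refl _
  | some k => exact countP_set_false_le vis k

lemma tCount_lset_lt (vis : List Bool) (n u : Int) (hlen : vis.length = (n+1).toNat)
    (hn : 1 ≤ n) (h1 : 0 ≤ u) (h2 : u ≤ n) (h : lgetB vis u = true) :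
    tCount (lset vis u false) < tCount vis := by
  rw [lgetB_slot vis n u hlen hn h1 h2] at h
  have hsome : vis[u.toNat]? = some true := by
    cases hx : vis[u.toNat]? with
    | none => rw [hx] at h; cases h
    | some b => rw [hx] at h; simp at h; rw [h]
  rw [lset_slot vis n u false hlen hn h1 h2]
  exact countP_set_false_lt vis u.toNat hsome

lemma tCount_pos (vis : List Bool) (u : Int) (h : lgetB vis u = true) :
    1 ≤ tCount vis := by
  unfold lgetB PySem.List.pyGet? at h
  cases hk : PySem.List.pyIdx? vis.length u with
  | none => rw [hk] at h; cases h
  | some k =>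
      rw [hk] at h
      simp only [Option.bind_some] at h
      have hsome : vis[k]? = some true := by
        cases hx : vis[k]? with
        | none => rw [hx] at h; cases h
        | some b => rw [hx] at h; simp at h; rw [h]
      have hmem : true ∈ vis := List.mem_of_getElem? hsome
      have : 0 < vis.countP (fun b => b) := by
        rw [List.countP_pos_iff]; exact ⟨true, hmem, rfl⟩
      unfold tCount
      omega

-- visited entries only get switched off, and the array length is preserved
def MonoA (graph : List (Int × List Int)) (fa : Nat) : Prop :=
  ∀ u c dis vis r, dfsA graph fa u c dis vis = some r →
    tCount r.2 ≤ tCount vis ∧ r.2.length = vis.length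

lemma monoLoop {graph : List (Int × List Int)} (fa : Nat) (ihA : MonoA graph fa) :
    ∀ l c dis vis r, dfsLoop graph fa l c dis vis = some r →
      tCount r.2 ≤ tCount vis ∧ r.2.length = vis.length := by
  intro l
  induction l with
  | nil => intro c dis vis r hrun; rw [dfsLoop] at hrun; cases hrun; exact ⟨le_refl _, rfl⟩
  | cons v rest' ih =>
      intro c dis vis r hrun
      rw [dfsLoop] at hrun
      by_cases hv : lgetB vis v = true
      · rw [if_pos hv] at hrun
        cases h2 : dfsA graph fa v (c+1) dis vis with
        | none => rw [h2] at hrun; cases hrun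
        | some dv =>
            rw [h2] at hrun
            obtain ⟨ha1, ha2⟩ := ihA v (c+1) dis vis dv h2
            obtain ⟨hb1, hb2⟩ := ih c dv.1 dv.2 r hrun
            exact ⟨hb1.trans ha1, hb2.trans ha2⟩
      · rw [if_neg hv] at hrun
        exact ih c dis vis r hrun

lemma monoA {graph : List (Int × List Int)} : ∀ fa, MonoA graph fa := by
  intro fa
  induction fa with
  | zero => intro u c dis vis r hA; simp [dfsA] at hA
  | succ fa ih =>
      intro u c dis vis r hA
      rw [dfsA] at hA
      obtain ⟨h1, h2⟩ := monoLoop fa ih _ c _ _ r hA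
      exact ⟨h1.trans (tCount_lset_le vis u), h2.trans (length_lset vis u false)⟩

lemma fuelLoop {graph : List (Int × List Int)} {n : Int} (_hn : 1 ≤ n) (_hg : GoodR graph n)
    (fa : Nat)
    (ihA : ∀ u c dis vis, u ∈ reachSet graph → vis.length = (n+1).toNat →
      lgetB vis u = true → tCount vis ≤ fa → (dfsA graph fa u c dis vis).isSome) :
    ∀ l c dis vis, (∀ v ∈ l, v ∈ reachSet graph) → vis.length = (n+1).toNat →
      tCount vis ≤ fa → (dfsLoop graph fa l c dis vis).isSome := by
  intro l
  induction l with
  | nil => intro c dis vis _ _ _; rw [dfsLoop]; rfl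
  | cons v rest' ih =>
      intro c dis vis hval hlen hc
      rw [dfsLoop]
      by_cases hv : lgetB vis v = true
      · rw [if_pos hv]
        have hvr : v ∈ reachSet graph := hval v (List.mem_cons_self)
        have h := ihA v (c+1) dis vis hvr hlen hv hc
        cases h2 : dfsA graph fa v (c+1) dis vis with
        | none => rw [h2] at h; cases h
        | some dv =>
            obtain ⟨hm1, hm2⟩ := monoA fa v (c+1) dis vis dv h2
            exact ih c dv.1 dv.2 (fun w hw => hval w (List.mem_cons_of_mem _ hw))
              (hm2.trans hlen) (hm1.trans hc)
      · rw [if_neg hv]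
        exact ih c dis vis (fun w hw => hval w (List.mem_cons_of_mem _ hw)) hlen hc

lemma fuelA {graph : List (Int × List Int)} {n : Int} (hn : 1 ≤ n) (hg : GoodR graph n) :
    ∀ fa u c dis vis, u ∈ reachSet graph → vis.length = (n+1).toNat →
      lgetB vis u = true → tCount vis ≤ fa → (dfsA graph fa u c dis vis).isSome := by
  intro fa
  induction fa with
  | zero =>
      intro u c dis vis _ _ hvis hc
      have := tCount_pos vis u hvis
      omega
  | succ fa ih =>
      intro u c dis vis hur hlen hvis hc
      rw [dfsA]
      obtain ⟨hu1, hu2⟩ := hg u hur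
      apply fuelLoop hn hg fa ih
      · intro v hv; exact reach_closed hur hv
      · rw [length_lset]; exact hlen
      · have := tCount_lset_lt vis n u hlen hn hu1 hu2 hvis
        omega

-- the two even/odd counting loops agree
lemma countFold (f g : Int → Int) :
    ∀ (l : List Int), (∀ i ∈ l, f i = g i) → ∀ e o : Int,
      (l.foldl (fun (p : Int × Int) i =>
          if PySem.Int.mod (f i) 2 ≠ 0 then (p.1, p.2 + 1) else (p.1 + 1, p.2)) (e, o)).1 =
        l.foldl (fun acc i => if PySem.Int.mod (g i) 2 = 0 then acc + 1 else acc) e ∧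
      (l.foldl (fun (p : Int × Int) i =>
          if PySem.Int.mod (f i) 2 ≠ 0 then (p.1, p.2 + 1) else (p.1 + 1, p.2)) (e, o)).1 +
      (l.foldl (fun (p : Int × Int) i =>
          if PySem.Int.mod (f i) 2 ≠ 0 then (p.1, p.2 + 1) else (p.1 + 1, p.2)) (e, o)).2 =
        e + o + l.length := by
  intro l
  induction l with
  | nil => intro _ e o; simp
  | cons i t ih =>
      intro hfg e o
      have hfi : f i = g i := hfg i (List.mem_cons_self)
      have hfg' : ∀ w ∈ t, f w = g w := fun w hw => hfg w (List.mem_cons_of_mem _ hw)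
      by_cases hm : PySem.Int.mod (g i) 2 = 0
      · simp only [List.foldl_cons, hfi, hm, ne_eq, not_true_eq_false, if_false, if_true]
        obtain ⟨h1, h2⟩ := ih hfg' (e+1) o
        refine ⟨h1, ?_⟩
        rw [h2]
        simp
        omega
      · simp only [List.foldl_cons, hfi, ne_eq, hm, not_false_eq_true, if_true, if_false]
        obtain ⟨h1, h2⟩ := ih hfg' e (o+1)
        refine ⟨h1, ?_⟩
        rw [h2]
        simp
        omega

lemma countP_replicate_true (k : Nat) : (List.replicate k true).countP (fun b => b) = k := by
  induction k with
  | zero => simp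
  | succ k ih => simp [List.replicate_succ, ih]

theorem countOfNodes_spec : Claim_equal_countOfNodes := by
  intro graph n _ hpre
  obtain ⟨hn, hk1, hnd, hpr⟩ := hpre
  have hg : GoodR graph n := fun v hv => ⟨(hpr v hv).1, (hpr v hv).2.1⟩
  unfold Spec_countOfNodes countOfNodes countOfNodes_alt
  simp only []
  set dis0 := List.replicate (n+1).toNat (0 : Int) with hdis0
  set vis0 := List.replicate (n+1).toNat true with hvis0
  have hlenv : vis0.length = (n+1).toNat := by rw [hvis0]; simp
  have hvis1 : lgetB vis0 1 = true := by
    rw [lgetB_slot vis0 n 1 hlenv hn (by omega) hn]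
    rw [hvis0, List.getElem?_replicate_of_lt (by omega)]
    rfl
  have htc : tCount vis0 = (n+1).toNat := by
    rw [hvis0]; exact countP_replicate_true _
  have hs := fuelA hn hg ((n+1).toNat + 1) 1 0 dis0 vis0 (one_mem_reach graph) hlenv
    hvis1 (by omega)
  obtain ⟨r, hr⟩ := Option.isSome_iff_exists.mp hs
  have hM0 : MatchS n dis0 vis0 PySem.Dict.empty := by
    refine ⟨by simp [hdis0], hlenv, ?_⟩
    intro j h1 h2
    constructor
    · rw [lgetB_slot vis0 n j hlenv hn h1 h2]
      rw [hvis0, List.getElem?_replicate_of_lt (by omega)]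
      simp [PySem.Dict.contains_empty]
    · rw [lgetI_slot dis0 n j (by rw [hdis0]; simp) hn h1 h2]
      rw [hdis0, List.getElem?_replicate_of_lt (by omega)]
      simp [PySem.Dict.getD_empty]
  obtain ⟨D₁, hM₁, _, he⟩ :=
    simA hn hg ((n+1).toNat + 1) 1 0 dis0 vis0 r PySem.Dict.empty (one_mem_reach graph)
      (PySem.Dict.contains_empty 1) hM0 hr
  have hB : execB graph [(1, pyLookup graph 1)] (PySem.Dict.empty.insert 1 0) = D₁ := by
    rw [he [], execB_nil]
  rw [hr, hB]
  dsimp only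
  have hfg : ∀ i ∈ PySem.List.pyRange 1 (n+1) 1, lgetI r.1 i = D₁.getD i 0 := by
    intro i hi
    obtain ⟨hi1, hi2⟩ := PySem.List.mem_pyRange_one.mp hi
    exact (hM₁.2.2 i (by omega) (by omega)).2
  obtain ⟨h1, h2⟩ := countFold (fun i => lgetI r.1 i) (fun i => D₁.getD i 0)
    (PySem.List.pyRange 1 (n+1) 1) hfg 0 0
  rw [h1]
  have hlenr : ((PySem.List.pyRange 1 (n+1) 1).length : Int) = n := by
    rw [PySem.List.length_pyRange_one]; omega
  rw [h1, hlenr] at h2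
  have hodd : ((PySem.List.pyRange 1 (n+1) 1).foldl
      (fun (p : Int × Int) i =>
        if PySem.Int.mod (lgetI r.1 i) 2 ≠ 0 then (p.1, p.2 + 1) else (p.1 + 1, p.2)) (0, 0)).2 =
      n - (PySem.List.pyRange 1 (n+1) 1).foldl
        (fun acc i => if PySem.Int.mod (D₁.getD i 0) 2 = 0 then acc + 1 else acc) 0 := by
    omega
  rw [hodd]
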